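-- pv_equiv track=rewrite | github.com/RoslinErla/AllAssignments | projects/move.py | starting_point
-- ===== SOURCE A (Python) =====
-- START= 1
--
-- END= 10
--
-- def starting_point(number):
--     empty_string= ""
--     for numbers in range (START,END+1):
--         if number == numbers:
--             empty_string += "o"
--         else:
--             empty_string += "x"
--     return empty_string
-- ===== SOURCE B (Python) =====
-- START = 1
-- END = 10
--
-- def starting_point(number):
--     s = "x" * 10
--     if number in range(START, END + 1):
--         i = int(number) - 1
--         return s[:i] + "o" + s[i + 1:]
--     return s
-- ===== Notes on version B (the rewrite author's own statement) =====
-- stated objective: simpler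
-- what changed: Replaces the per-number loop with string concatenation by a closed-form construction: a constant all-'x' string with one character replaced via slicing when the number is in range.
import Mathlib
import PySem

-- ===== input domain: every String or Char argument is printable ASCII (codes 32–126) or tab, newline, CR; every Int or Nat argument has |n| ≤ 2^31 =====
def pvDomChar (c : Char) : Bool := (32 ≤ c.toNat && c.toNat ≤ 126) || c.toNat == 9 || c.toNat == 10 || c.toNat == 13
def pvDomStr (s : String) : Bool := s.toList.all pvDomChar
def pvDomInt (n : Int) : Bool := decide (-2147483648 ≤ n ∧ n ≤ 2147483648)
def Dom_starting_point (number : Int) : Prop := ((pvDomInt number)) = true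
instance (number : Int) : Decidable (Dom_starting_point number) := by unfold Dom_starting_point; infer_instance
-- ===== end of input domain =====

-- B replaces A's per-number loop with a closed-form slice construction over a constant "x"*10 string (objective: simpler).

-- ===== PORT A =====
-- loop over range(START, END+1) = range(1, 11), appending "o" or "x"
def starting_point (number : Int) : String :=
  (PySem.List.pyRange 1 11 1).foldl
    (fun empty_string numbers => empty_string ++ (if number = numbers then "o" else "x")) ""

-- ===== PORT B =====
-- s = "x"*10; if number in range(1, 11): return s[:i] + "o" + s[i+1:]; else s
def starting_point_alt (number : Int) : String :=
  let s : List Char := List.replicate 10 'x'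
  if 1 ≤ number ∧ number < 11 then
    let i := number - 1
    String.mk (PySem.List.slice s none (some i) ++ ['o'] ++ PySem.List.slice s (some (i + 1)) none)
  else
    String.mk s

-- ===== PRECONDITION & SPEC =====
def Spec_starting_point (number : Int) (out : String) : Prop := out = starting_point_alt number
instance (number : Int) (out : String) : Decidable (Spec_starting_point number out) := by unfold Spec_starting_point; infer_instance

-- ===== CLAIM (what is proved, stated in full; the proofs are below) =====
def Claim_equal_starting_point : Prop := ∀ (number : Int), Dom_starting_point number → Spec_starting_point number (starting_point number)

-- ===== LEMMAS AND PROOFS =====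

-- ===== VERDICT (by name: the statement is the Claim_ definition above) =====
theorem starting_point_spec : Claim_equal_starting_point := by
  intro number _
  unfold Spec_starting_point
  by_cases h : 1 ≤ number ∧ number < 11
  · obtain ⟨h1, h2⟩ := h
    interval_cases number <;> decide
  · have hr : PySem.List.pyRange 1 11 1 = [1,2,3,4,5,6,7,8,9,10] := by decide
    push_neg at h
    unfold starting_point starting_point_alt
    rw [hr]
    simp only [List.foldl]
    rw [if_neg (by omega : ¬ number = 1), if_neg (by omega : ¬ number = 2),
        if_neg (by omega : ¬ number = 3), if_neg (by omega : ¬ number = 4),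
        if_neg (by omega : ¬ number = 5), if_neg (by omega : ¬ number = 6),
        if_neg (by omega : ¬ number = 7), if_neg (by omega : ¬ number = 8),
        if_neg (by omega : ¬ number = 9), if_neg (by omega : ¬ number = 10),
        if_neg (by omega : ¬ (1 ≤ number ∧ number < 11))]
    decide
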